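-- pv_equiv track=rewrite | github.com/epfllibrary/infoscience-imports | clients/api_epfl_client.py | _identify_best_candidate
-- ===== SOURCE A (Python) =====
-- def _identify_best_candidate(results, lastname, initial=None):
--     """
--     Identifies the best candidate from the list of results based on the last name
--     and an optional initial of the first name.
--
--     :param results: List of person records returned from the API.
--     :param lastname: Last name to match against.
--     :param initial: Initial of the first name to match against (optional).
--     :return: The best candidate record or None if no match is found.
--     """
--     candidates = []
--
--     for person in results["persons"]:
--         if person["lastname"].lower() == lastname.lower():
--             if initial:
--                 # Check if the initial matches
--                 if person["firstname"].startswith(initial.upper()):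
--                     candidates.append(person)
--             else:
--                 # No initial provided, consider all matches
--                 candidates.append(person)
--
--     # Return the best candidate based on additional criteria, if necessary
--     if candidates:
--         if len(candidates) == 1:
--             return candidates[0]  # Only one candidate found
--         else:
--             # If multiple candidates, apply further logic to determine the best candidate
--             # For this example, we can prioritize based on some custom logic, such as:
--             # 1. Prioritize based on the presence of an email
--             # 2. Prioritize based on known affiliations or roles
--             best_candidate = max(
--                 candidates, key=lambda x: ("email" in x) + ("org" in x)
--             )
--             return best_candidate
--
--     return None
-- ===== SOURCE B (Python) =====
-- def _identify_best_candidate(results, lastname, initial=None):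
--     """Single-pass running-max: same matching rules, first record with the
--     highest ('email' in x) + ('org' in x) score wins (strict '>')."""
--     key = lastname.lower()
--     prefix = initial.upper() if initial else None
--     best = None
--     best_score = -1
--     for person in results["persons"]:
--         if person["lastname"].lower() != key:
--             continue
--         if prefix is not None and not person["firstname"].startswith(prefix):
--             continue
--         score = ("email" in person) + ("org" in person)
--         if score > best_score:
--             best, best_score = person, score
--     return best
-- ===== Notes on version B (the rewrite author's own statement) =====
-- stated objective: simpler
-- what changed: Replaces A's two-phase build-candidate-list then len==1 special case / max(key=...) with a single pass keeping a running best and best_score (strict '>' so the first top-scoring match wins, like max), never materializing the candidate list.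
import Mathlib
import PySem

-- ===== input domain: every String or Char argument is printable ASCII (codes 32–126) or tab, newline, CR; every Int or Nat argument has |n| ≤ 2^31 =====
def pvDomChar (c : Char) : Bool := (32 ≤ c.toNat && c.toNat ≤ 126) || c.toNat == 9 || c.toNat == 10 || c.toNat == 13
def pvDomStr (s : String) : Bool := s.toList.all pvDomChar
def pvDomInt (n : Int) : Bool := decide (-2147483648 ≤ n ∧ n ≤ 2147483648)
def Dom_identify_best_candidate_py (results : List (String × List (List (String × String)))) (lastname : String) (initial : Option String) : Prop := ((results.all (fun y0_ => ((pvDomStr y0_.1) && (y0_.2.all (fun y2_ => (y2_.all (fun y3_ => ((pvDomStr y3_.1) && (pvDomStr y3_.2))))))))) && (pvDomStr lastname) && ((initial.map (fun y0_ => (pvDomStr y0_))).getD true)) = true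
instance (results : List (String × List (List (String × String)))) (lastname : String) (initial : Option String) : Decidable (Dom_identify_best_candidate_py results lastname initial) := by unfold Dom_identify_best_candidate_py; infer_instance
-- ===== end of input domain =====

-- B folds A's filter-then-max (with its len==1 special case) into one running-max pass
-- over results["persons"] with strict '>' so the first top-scoring match wins; objective: simpler.


-- dict access d[k] (total form: Pre_ guarantees the key is present where Python reads it)
def pvGetS (d : List (String × String)) (k : String) : String := (List.lookup k d).getD ""
-- the max-key of A's lambda / B's score: ("email" in x) + ("org" in x)
def pvScore (d : List (String × String)) : Int :=
  (if d.any (fun kv => kv.1 == "email") then 1 else 0) + (if d.any (fun kv => kv.1 == "org") then 1 else 0)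

-- ===== PORT A =====
def identify_best_candidate_py (results : List (String × List (List (String × String)))) (lastname : String) (initial : Option String) : Option (List (String × String)) :=
  let persons := (List.lookup "persons" results).getD []
  let candidates := persons.foldl (fun acc person =>
    if PySem.Str.lower (pvGetS person "lastname") == PySem.Str.lower lastname then
      match initial with
      | some ini =>
        if ini = "" then acc ++ [person]   -- 'if initial:' — empty string is falsy
        else if PySem.Str.startswith (pvGetS person "firstname") (PySem.Str.upper ini) then acc ++ [person]
        else acc
      | none => acc ++ [person]
    else acc) []
  match candidates with
  | [] => none
  | [c] => some c
  | _ => PySem.List.max? candidates pvScore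

-- ===== PORT B =====
def identify_best_candidate_py_alt (results : List (String × List (List (String × String)))) (lastname : String) (initial : Option String) : Option (List (String × String)) :=
  let key := PySem.Str.lower lastname
  let pfx : Option String := match initial with
    | some i => if i = "" then none else some (PySem.Str.upper i)
    | none => none
  (((List.lookup "persons" results).getD []).foldl
    (fun (st : Option (List (String × String)) × Int) person =>
      if PySem.Str.lower (pvGetS person "lastname") ≠ key then st
      else if (match pfx with
               | some p => !(PySem.Str.startswith (pvGetS person "firstname") p)
               | none => false) then st
      else
        let score := pvScore person
        if score > st.2 then (some person, score) else st)
    (none, -1)).1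

-- ===== PRECONDITION & SPEC =====
-- Pre_ excludes exactly the inputs where Python A raises: a missing "persons" key (KeyError),
-- a person without "lastname", or a lastname-matching person without "firstname" when a
-- non-empty initial is given (KeyError inside the loop).
def Pre_identify_best_candidate_py (results : List (String × List (List (String × String)))) (lastname : String) (initial : Option String) : Prop :=
  (List.lookup "persons" results).isSome = true ∧
  ∀ person ∈ (List.lookup "persons" results).getD [],
    (List.lookup "lastname" person).isSome = true ∧
    (∀ i ∈ initial.toList, i ≠ "" →
      PySem.Str.lower (pvGetS person "lastname") = PySem.Str.lower lastname →
      (List.lookup "firstname" person).isSome = true)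
instance (results : List (String × List (List (String × String)))) (lastname : String) (initial : Option String) : Decidable (Pre_identify_best_candidate_py results lastname initial) := by unfold Pre_identify_best_candidate_py; infer_instance

def pvWitness_identify_best_candidate_py : (List (String × List (List (String × String)))) × String × Option String :=
  ([("persons", [[("lastname", "Doe"), ("firstname", "Jane"), ("email", "j@x")],
                 [("lastname", "doe"), ("firstname", "John")]])], "DOE", some "j")

def Spec_identify_best_candidate_py (results : List (String × List (List (String × String)))) (lastname : String) (initial : Option String) (out : Option (List (String × String))) : Prop := out = identify_best_candidate_py_alt results lastname initial
instance (results : List (String × List (List (String × String)))) (lastname : String) (initial : Option String) (out : Option (List (String × String))) : Decidable (Spec_identify_best_candidate_py results lastname initial out) := by unfold Spec_identify_best_candidate_py; infer_instance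

-- ===== CLAIM (what is proved, stated in full; the proofs are below) =====
def Claim_equal_identify_best_candidate_py : Prop := ∀ (results : List (String × List (List (String × String)))) (lastname : String) (initial : Option String), Dom_identify_best_candidate_py results lastname initial → Pre_identify_best_candidate_py results lastname initial → Spec_identify_best_candidate_py results lastname initial (identify_best_candidate_py results lastname initial)

-- ===== LEMMAS AND PROOFS =====

-- the common match predicate both loops apply to a person record
def pvPred (lastname : String) (initial : Option String) (person : List (String × String)) : Bool :=
  (PySem.Str.lower (pvGetS person "lastname") == PySem.Str.lower lastname) &&
  (match initial with
   | some i => if i = "" then true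
               else PySem.Str.startswith (pvGetS person "firstname") (PySem.Str.upper i)
   | none => true)

lemma pvScore_nonneg (d : List (String × String)) : 0 ≤ pvScore d := by
  unfold pvScore; split <;> split <;> omega

-- the running-max fold started at (some m, score m) is Python's max of m :: cs
lemma runmax_aux (cs : List (List (String × String))) (m : List (String × String)) :
    (cs.foldl (fun (st : Option (List (String × String)) × Int) x =>
        if pvScore x > st.2 then (some x, pvScore x) else st) (some m, pvScore m)).1
      = PySem.List.max? (m :: cs) pvScore := by
  induction cs generalizing m with
  | nil => rfl
  | cons c cs ih =>
    simp only [List.foldl_cons, PySem.List.max?] at ih ⊢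
    by_cases h : pvScore m < pvScore c
    · simp only [gt_iff_lt, h, if_pos]; exact ih c
    · simp only [gt_iff_lt, h, if_neg, not_false_eq_true]; exact ih m

-- the running-max loop computes Python's max (first maximal element)
lemma runmax_eq_max? (cs : List (List (String × String))) :
    (cs.foldl (fun (st : Option (List (String × String)) × Int) x =>
        if pvScore x > st.2 then (some x, pvScore x) else st) (none, -1)).1
      = PySem.List.max? cs pvScore := by
  cases cs with
  | nil => rfl
  | cons c cs =>
    have h : pvScore c > (-1 : Int) := lt_of_lt_of_le (by omega) (pvScore_nonneg c)
    simp only [List.foldl_cons, h, if_pos, gt_iff_lt]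
    exact runmax_aux cs c

-- A's filtered candidate list
lemma A_eq_max? (results : List (String × List (List (String × String)))) (lastname : String) (initial : Option String) :
    identify_best_candidate_py results lastname initial
      = PySem.List.max? (((List.lookup "persons" results).getD []).filter (pvPred lastname initial)) pvScore := by
  unfold identify_best_candidate_py
  have hb : (fun (acc : List (List (String × String))) person =>
      if PySem.Str.lower (pvGetS person "lastname") == PySem.Str.lower lastname then
        match initial with
        | some ini =>
          if ini = "" then acc ++ [person]
          else if PySem.Str.startswith (pvGetS person "firstname") (PySem.Str.upper ini) then acc ++ [person]
          else acc
        | none => acc ++ [person]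
      else acc)
      = (fun acc person => if pvPred lastname initial person then acc ++ [person] else acc) := by
    funext acc person
    cases initial with
    | none => simp [pvPred]
    | some i =>
      by_cases hi : i = "" <;>
        by_cases hl : PySem.Str.lower (pvGetS person "lastname") = PySem.Str.lower lastname <;>
        by_cases hs : PySem.Chars.startswith (pvGetS person "firstname").toList (PySem.Chars.upper i.toList) = true <;>
        simp [pvPred, hi, hl, hs]
  simp only [hb]
  rw [show (fun (acc : List (List (String × String))) person => if pvPred lastname initial person then acc ++ [person] else acc)
        = (fun acc person => if pvPred lastname initial person then acc ++ [(fun x => x) person] else acc) from rfl,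
      PySem.List.foldl_append_if]
  simp only [List.map_id_fun', id_eq, List.nil_append]
  cases hc : ((List.lookup "persons" results).getD []).filter (pvPred lastname initial) with
  | nil => rfl
  | cons c cs =>
    cases cs with
    | nil => rfl
    | cons d ds => rfl

-- B's loop is the running max over the same filtered list
lemma B_eq_max? (results : List (String × List (List (String × String)))) (lastname : String) (initial : Option String) :
    identify_best_candidate_py_alt results lastname initial
      = PySem.List.max? (((List.lookup "persons" results).getD []).filter (pvPred lastname initial)) pvScore := by
  unfold identify_best_candidate_py_alt
  have hb : (fun (st : Option (List (String × String)) × Int) person =>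
      if PySem.Str.lower (pvGetS person "lastname") ≠ PySem.Str.lower lastname then st
      else if (match (match initial with
                      | some i => if i = "" then none else some (PySem.Str.upper i)
                      | none => none : Option String) with
               | some p => !(PySem.Str.startswith (pvGetS person "firstname") p)
               | none => false) then st
      else
        let score := pvScore person
        if score > st.2 then (some person, score) else st)
      = (fun st person => if pvPred lastname initial person then
            (if pvScore person > st.2 then (some person, pvScore person) else st) else st) := by
    funext st person
    cases initial with
    | none => by_cases hl : PySem.Str.lower (pvGetS person "lastname") = PySem.Str.lower lastname <;>
        simp [pvPred, hl]
    | some i =>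
      by_cases hi : i = "" <;>
        by_cases hl : PySem.Str.lower (pvGetS person "lastname") = PySem.Str.lower lastname <;>
        by_cases hs : PySem.Chars.startswith (pvGetS person "firstname").toList (PySem.Chars.upper i.toList) = true <;>
        simp [pvPred, hi, hl, hs]
  simp only [hb]
  rw [← List.foldl_filter]
  exact runmax_eq_max? _

-- ===== VERDICT (by name: the statement is the Claim_ definition above) =====
theorem identify_best_candidate_py_spec : Claim_equal_identify_best_candidate_py := by
  intro results lastname initial _ _
  unfold Spec_identify_best_candidate_py
  rw [A_eq_max?, B_eq_max?]
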